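-- pv_equiv track=rewrite | github.com/Wittmaxi/estimate-growth-of-groups | main.py | has_inverse_in_clique
-- ===== SOURCE A (Python) =====
-- def has_inverse_in_clique(clique):
--     for node in clique:
--         if node.startswith("-"):
--             # If the node is an inverse, check if its "uninverse" is in the clique
--             uninverse_node = node[1:]  # Remove the leading "-"
--             if uninverse_node in clique:
--                 return True
--         else:
--             # If the node is not an inverse, check if its inverse is in the clique
--             inverse_node = f"-{node}"
--             if inverse_node in clique:
--                 return True
--     return False
-- ===== SOURCE B (Python) =====
-- def has_inverse_in_clique(clique):
--     def opposite(node):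
--         return node[1:] if node.startswith("-") else "-" + node
--     nodes = sorted(set(clique))
--     opps = sorted({opposite(n) for n in clique})
--     i = j = 0
--     while i < len(nodes) and j < len(opps):
--         if nodes[i] == opps[j]:
--             return True
--         if nodes[i] < opps[j]:
--             i += 1
--         else:
--             j += 1
--     return False
-- ===== Notes on version B (the rewrite author's own statement) =====
-- stated objective: faster
-- what changed: A rescans the whole clique for each node's inverse/uninverse (quadratic); B sorts the deduplicated nodes and the deduplicated opposite-images once and detects a common element with a single two-pointer merge.
import Mathlib
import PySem

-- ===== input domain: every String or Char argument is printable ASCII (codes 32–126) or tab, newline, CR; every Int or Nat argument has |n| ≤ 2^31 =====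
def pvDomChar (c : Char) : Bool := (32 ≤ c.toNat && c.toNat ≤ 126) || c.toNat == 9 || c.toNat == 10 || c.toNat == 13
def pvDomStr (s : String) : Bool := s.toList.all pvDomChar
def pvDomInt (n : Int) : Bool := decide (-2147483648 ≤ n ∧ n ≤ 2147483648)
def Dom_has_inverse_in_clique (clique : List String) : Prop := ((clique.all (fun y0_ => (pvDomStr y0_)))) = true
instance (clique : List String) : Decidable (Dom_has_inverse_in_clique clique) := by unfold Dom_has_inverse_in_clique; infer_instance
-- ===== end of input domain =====

-- B replaces A's per-node rescans of the whole clique by sort-then-merge: sort the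
-- deduplicated nodes and the deduplicated opposite-images, then one two-pointer merge
-- detects a common element; objective: faster (O(n log n · m) vs O(n² · m)).

-- ===== PORT A =====
-- loop 'for node in clique' with early return; membership tests scan the WHOLE clique
def hasInvAuxA (clique : List String) : List String → Bool
  | [] => false
  | node :: rest =>
    if PySem.Str.startswith node "-" then
      -- uninverse_node = node[1:]
      let uninverse_node := PySem.Str.slice node (some 1) none
      if uninverse_node ∈ clique then true else hasInvAuxA clique rest
    else
      -- inverse_node = f"-{node}"  (exact: prepends the single char '-')
      let inverse_node := String.ofList ('-' :: node.toList)
      if inverse_node ∈ clique then true else hasInvAuxA clique rest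

def has_inverse_in_clique (clique : List String) : Bool := hasInvAuxA clique clique

-- ===== PORT B =====
def pyOpposite (node : String) : String :=
  if PySem.Str.startswith node "-" then PySem.Str.slice node (some 1) none
  else String.ofList ('-' :: node.toList)  -- "-" + node (exact: prepends one char)

-- the while loop over indices i, j: structural two-pointer merge over the remaining tails
def merge2 : List String → List String → Bool
  | [], _ => false
  | _ :: _, [] => false
  | a :: as, b :: bs =>
    if a = b then true
    else if a < b then merge2 as (b :: bs)
    else merge2 (a :: as) bs
termination_by l1 l2 => l1.length + l2.length

def has_inverse_in_clique_alt (clique : List String) : Bool :=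
  let nodes := PySem.List.sorted (PySem.Set.ofList clique) (fun x => x) false
  let opps := PySem.List.sorted (PySem.Set.ofList (clique.map pyOpposite)) (fun x => x) false
  merge2 nodes opps

-- ===== PRECONDITION & SPEC =====
def Spec_has_inverse_in_clique (clique : List String) (out : Bool) : Prop := out = has_inverse_in_clique_alt clique
instance (clique : List String) (out : Bool) : Decidable (Spec_has_inverse_in_clique clique out) := by unfold Spec_has_inverse_in_clique; infer_instance

-- ===== CLAIM (what is proved, stated in full; the proofs are below) =====
def Claim_equal_has_inverse_in_clique : Prop := ∀ (clique : List String), Dom_has_inverse_in_clique clique → Spec_has_inverse_in_clique clique (has_inverse_in_clique clique)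

-- ===== LEMMAS AND PROOFS =====

-- A scans: result = does some node's opposite occur anywhere in the clique
theorem auxA_eq (clique l : List String) :
    hasInvAuxA clique l = l.any (fun n => decide (pyOpposite n ∈ clique)) := by
  induction l with
  | nil => rfl
  | cons n rest ih =>
    simp only [hasInvAuxA, List.any_cons, ih]
    split <;> split <;> simp_all [pyOpposite]

-- two-pointer merge on strictly increasing lists detects exactly a common element
theorem merge2_iff (l1 l2 : List String) (h1 : l1.Pairwise (· < ·))
    (h2 : l2.Pairwise (· < ·)) :
    merge2 l1 l2 = true ↔ ∃ x, x ∈ l1 ∧ x ∈ l2 := by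
  fun_induction merge2 l1 l2 with
  | case1 l2 => simp
  | case2 a as => simp
  | case3 as x bs =>
    exact ⟨fun _ => ⟨x, List.mem_cons_self, List.mem_cons_self⟩, fun _ => rfl⟩
  | case4 a as b bs hne hlt ih =>
    rw [ih (h1.sublist (List.sublist_cons_self a as)) h2]
    constructor
    · rintro ⟨x, hx1, hx2⟩; exact ⟨x, List.mem_cons_of_mem _ hx1, hx2⟩
    · rintro ⟨x, hx1, hx2⟩
      rcases List.mem_cons.mp hx1 with rfl | hx1'
      · -- x = a ∈ b :: bs contradicts a < b ≤ every element of b :: bs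
        rcases List.mem_cons.mp hx2 with rfl | hx2'
        · exact absurd rfl hne
        · exact absurd (lt_trans hlt ((List.pairwise_cons.mp h2).1 x hx2')) (lt_irrefl x)
      · exact ⟨x, hx1', hx2⟩
  | case5 a as b bs hne hge ih =>
    rw [ih h1 (h2.sublist (List.sublist_cons_self b bs))]
    have hbla : b < a := lt_of_le_of_ne (not_lt.mp hge) (fun h => hne h.symm)
    constructor
    · rintro ⟨x, hx1, hx2⟩; exact ⟨x, hx1, List.mem_cons_of_mem _ hx2⟩
    · rintro ⟨x, hx1, hx2⟩
      rcases List.mem_cons.mp hx2 with rfl | hx2'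
      · rcases List.mem_cons.mp hx1 with rfl | hx1'
        · exact absurd rfl hne
        · exact absurd (lt_trans hbla ((List.pairwise_cons.mp h1).1 x hx1')) (lt_irrefl x)
      · exact ⟨x, hx1, hx2'⟩

-- ===== VERDICT (by name: the statement is the Claim_ definition above) =====
theorem has_inverse_in_clique_spec : Claim_equal_has_inverse_in_clique := by
  intro clique _
  show has_inverse_in_clique clique = has_inverse_in_clique_alt clique
  rw [has_inverse_in_clique, auxA_eq, has_inverse_in_clique_alt]
  rw [Bool.eq_iff_iff]
  rw [merge2_iff _ _ (PySem.List.sorted_ofList_pairwise_lt _)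
      (PySem.List.sorted_ofList_pairwise_lt _)]
  simp only [List.any_eq_true, decide_eq_true_eq, PySem.List.mem_sorted,
    PySem.Set.mem_ofList, List.mem_map]
  constructor
  · rintro ⟨n, hn, h⟩
    exact ⟨pyOpposite n, h, n, hn, rfl⟩
  · rintro ⟨x, hx, n, hn, rfl⟩
    exact ⟨n, hn, hx⟩
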